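-- pv_equiv track=rewrite | github.com/doomspec/Mizore-dev | src/HamiltonianGenerator/_stationary_qubit_reducer.py | get_mapping_by_reduced_location
-- ===== SOURCE A (Python) =====
-- def get_mapping_by_reduced_location(n_qubit,reduced_location):
--     mapping=[-1]*n_qubit
--     shift=0
--     for i in range(n_qubit):
--         if i in reduced_location:
--             shift+=1
--         else:
--             mapping[i]=i-shift
--     return mapping
-- ===== SOURCE B (Python) =====
-- def get_mapping_by_reduced_location(n_qubit, reduced_location):
--     reduced = set(reduced_location)
--     kept = [i for i in range(n_qubit) if i not in reduced]
--     mapping = [-1] * n_qubit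
--     for new, i in enumerate(kept):
--         mapping[i] = new
--     return mapping
-- ===== Notes on version B (the rewrite author's own statement) =====
-- stated objective: faster
-- what changed: Replaces A's single branching scan carrying a running shift (with an O(m) list-membership test inside the loop) by a two-pass decomposition: build the kept-index list via an O(1) set-membership filter, then number the survivors by enumeration and write only those positions.
import Mathlib
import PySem

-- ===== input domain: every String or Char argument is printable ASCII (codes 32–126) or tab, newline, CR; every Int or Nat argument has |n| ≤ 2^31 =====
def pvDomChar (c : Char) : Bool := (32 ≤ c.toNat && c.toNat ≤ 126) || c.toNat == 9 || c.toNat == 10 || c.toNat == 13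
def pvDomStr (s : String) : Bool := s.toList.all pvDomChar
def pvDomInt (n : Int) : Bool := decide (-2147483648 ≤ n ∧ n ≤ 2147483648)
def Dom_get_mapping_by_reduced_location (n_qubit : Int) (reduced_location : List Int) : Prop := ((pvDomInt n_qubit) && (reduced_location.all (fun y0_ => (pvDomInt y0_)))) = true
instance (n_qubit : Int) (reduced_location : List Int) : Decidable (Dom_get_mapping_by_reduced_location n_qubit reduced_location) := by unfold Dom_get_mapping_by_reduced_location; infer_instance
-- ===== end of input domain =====

-- B replaces A's single branching scan with a running shift by a two-pass build:
-- filter the kept indices first, then number them by enumeration (alternative decomposition).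

-- ===== PORT A =====
-- literal port of A: one pass over range(n_qubit), carrying (mapping, shift)
def get_mapping_by_reduced_location (n_qubit : Int) (reduced_location : List Int) : List Int :=
  ((PySem.List.pyRange 0 n_qubit 1).foldl
    (fun (st : List Int × Int) i =>
      if reduced_location.contains i then (st.1, st.2 + 1)
      else (PySem.List.pySetD st.1 i (i - st.2), st.2))
    (List.replicate n_qubit.toNat (-1), 0)).1

-- ===== PORT B =====
-- literal port of B: build kept list, then write enumeration indices
def get_mapping_by_reduced_location_alt (n_qubit : Int) (reduced_location : List Int) : List Int :=
  let reduced := PySem.Set.ofList reduced_location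
  let kept := (PySem.List.pyRange 0 n_qubit 1).filter (fun i => !(reduced.contains i))
  (PySem.List.enumerate kept 0).foldl
    (fun m p => PySem.List.pySetD m p.2 p.1)
    (List.replicate n_qubit.toNat (-1))

-- ===== PRECONDITION & SPEC =====
def Spec_get_mapping_by_reduced_location (n_qubit : Int) (reduced_location : List Int) (out : List Int) : Prop := out = get_mapping_by_reduced_location_alt n_qubit reduced_location
instance (n_qubit : Int) (reduced_location : List Int) (out : List Int) : Decidable (Spec_get_mapping_by_reduced_location n_qubit reduced_location out) := by unfold Spec_get_mapping_by_reduced_location; infer_instance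

-- ===== CLAIM (what is proved, stated in full; the proofs are below) =====
def Claim_equal_get_mapping_by_reduced_location : Prop := ∀ (n_qubit : Int) (reduced_location : List Int), Dom_get_mapping_by_reduced_location n_qubit reduced_location → Spec_get_mapping_by_reduced_location n_qubit reduced_location (get_mapping_by_reduced_location n_qubit reduced_location)

-- ===== LEMMAS AND PROOFS =====

theorem contains_ofList (rl : List Int) (i : Int) :
    (PySem.Set.ofList rl).contains i = rl.contains i := by
  simp [PySem.Set.mem_ofList]

-- invariant: after processing range(0,n), A's state = (B's map over kept(0,n), n - #kept(0,n))
theorem key (rl : List Int) (n : Nat) (init : List Int) :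
    (PySem.List.pyRange 0 n 1).foldl
      (fun (st : List Int × Int) i =>
        if rl.contains i then (st.1, st.2 + 1)
        else (PySem.List.pySetD st.1 i (i - st.2), st.2))
      (init, 0)
    = ((PySem.List.enumerate
          ((PySem.List.pyRange 0 n 1).filter (fun i => !(rl.contains i))) 0).foldl
        (fun m p => PySem.List.pySetD m p.2 p.1) init,
       (n : Int) - ((PySem.List.pyRange 0 n 1).filter (fun i => !(rl.contains i))).length) := by
  induction n with
  | zero => simp [PySem.List.enumerate_nil]
  | succ m ih =>
    have hsplit : PySem.List.pyRange 0 ((m : Int) + 1) 1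
        = PySem.List.pyRange 0 (m : Int) 1 ++ [(m : Int)] :=
      PySem.List.pyRange_one_succ_right (by positivity)
    push_cast
    rw [hsplit, List.foldl_append, ih, List.filter_append]
    by_cases hc : (m : Int) ∈ rl
    · simp [hc, Prod.ext_iff]
      omega
    · simp [hc, PySem.List.enumerate_append, PySem.List.enumerate_cons,
        PySem.List.enumerate_nil]

theorem get_mapping_equal (n_qubit : Int) (rl : List Int) :
    get_mapping_by_reduced_location n_qubit rl
      = get_mapping_by_reduced_location_alt n_qubit rl := by
  unfold get_mapping_by_reduced_location get_mapping_by_reduced_location_alt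
  simp only [contains_ofList]
  by_cases h : 0 ≤ n_qubit
  · have hn : n_qubit = (n_qubit.toNat : Int) := (Int.toNat_of_nonneg h).symm
    rw [hn, key rl n_qubit.toNat]
  · have hnil : PySem.List.pyRange 0 n_qubit 1 = [] :=
      PySem.List.pyRange_one_eq_nil (le_of_lt (not_le.mp h))
    simp [hnil, PySem.List.enumerate_nil]

-- ===== VERDICT (by name: the statement is the Claim_ definition above) =====
theorem get_mapping_by_reduced_location_spec : Claim_equal_get_mapping_by_reduced_location := by
  intro n rl _
  unfold Spec_get_mapping_by_reduced_location
  exact get_mapping_equal n rl
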